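-- pv_equiv track=rewrite | github.com/kotekloltrzy/MetIn-Wiedzy | Covering/Dzialajacy.py | sprzwdzanie_sprzecznosci
-- ===== SOURCE A (Python) =====
-- def sprzwdzanie_sprzecznosci(table):
--     sprzeczne = set()
--     wiersze = len(table)
--     for i in range(wiersze):
--         for j in range(i + 1, wiersze):
--             if table[i][:-1] == table[j][:-1]:
--                 if table[i][-1] != table[j][-1]:
--                     sprzeczne.add(i)
--                     sprzeczne.add(j)
--     return sprzeczne
-- ===== SOURCE B (Python) =====
-- def sprzwdzanie_sprzecznosci(table):
--     # group rows by their feature prefix; compare labels only within a group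
--     groups = {}
--     for i, row in enumerate(table):
--         groups.setdefault(tuple(row[:-1]), []).append((i, row[-1]))
--     sprzeczne = set()
--     for i, row in enumerate(table):
--         etykieta = row[-1]
--         for j, et in groups[tuple(row[:-1])]:
--             if j > i and et != etykieta:
--                 sprzeczne.add(i)
--                 sprzeczne.add(j)
--     return sprzeczne
-- ===== Notes on version B (the rewrite author's own statement) =====
-- stated objective: faster
-- what changed: hash-groups rows by their feature prefix once, then compares labels only among rows of the same group instead of testing every pair of rows for prefix equality
-- outside the precondition, e.g. on sprzwdzanie_sprzecznosci([[]]): A returns set(), B raises IndexError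
import Mathlib
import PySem

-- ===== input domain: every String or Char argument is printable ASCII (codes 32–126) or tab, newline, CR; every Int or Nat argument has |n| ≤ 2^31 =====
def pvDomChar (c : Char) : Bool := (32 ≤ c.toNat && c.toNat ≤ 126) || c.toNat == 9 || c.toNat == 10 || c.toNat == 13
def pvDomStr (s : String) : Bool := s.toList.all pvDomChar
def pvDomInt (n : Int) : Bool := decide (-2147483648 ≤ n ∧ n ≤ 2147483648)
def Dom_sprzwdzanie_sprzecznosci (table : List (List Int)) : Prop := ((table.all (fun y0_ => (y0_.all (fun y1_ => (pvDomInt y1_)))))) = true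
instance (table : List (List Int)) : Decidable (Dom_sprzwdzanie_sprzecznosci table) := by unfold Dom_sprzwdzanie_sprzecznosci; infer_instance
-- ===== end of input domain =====

-- B groups rows by feature prefix in a dict and compares labels only within a group (faster than A's all-pairs scan).


-- ===== PORT A =====
def sprzwdzanie_sprzecznosci (table : List (List Int)) : List Int :=
  let wiersze : Int := table.length
  (PySem.List.pyRange 0 wiersze 1).foldl (fun sprzeczne i =>
    (PySem.List.pyRange (i + 1) wiersze 1).foldl (fun sprzeczne j =>
      let ri := PySem.List.pyGetD table i []
      let rj := PySem.List.pyGetD table j []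
      if PySem.List.slice ri none (some (-1)) = PySem.List.slice rj none (some (-1)) then
        if (PySem.List.pyGet? ri (-1)).getD 0 ≠ (PySem.List.pyGet? rj (-1)).getD 0 then
          PySem.Set.add (PySem.Set.add sprzeczne i) j
        else sprzeczne
      else sprzeczne) sprzeczne)
    (PySem.Set.empty : PySem.Set Int)

-- ===== PORT B =====
def sprzwdzanie_sprzecznosci_alt (table : List (List Int)) : List Int :=
  let groups : PySem.Dict (List Int) (List (Int × Int)) :=
    (PySem.List.enumerate table 0).foldl
      (fun groups p =>
        groups.modify (PySem.List.slice p.2 none (some (-1))) []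
          (· ++ [(p.1, (PySem.List.pyGet? p.2 (-1)).getD 0)]))
      PySem.Dict.empty
  (PySem.List.enumerate table 0).foldl
    (fun sprzeczne p =>
      let etykieta := (PySem.List.pyGet? p.2 (-1)).getD 0
      (groups.getD (PySem.List.slice p.2 none (some (-1))) []).foldl
        (fun sprzeczne q =>
          if q.1 > p.1 ∧ q.2 ≠ etykieta then
            PySem.Set.add (PySem.Set.add sprzeczne p.1) q.1
          else sprzeczne) sprzeczne)
    (PySem.Set.empty : PySem.Set Int)

-- ===== PRECONDITION & SPEC =====
-- Pre_ excludes tables containing an empty row: there Python A raises IndexError whenever the empty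
-- row's feature prefix matches another short row's, and Python B always raises IndexError.
def Pre_sprzwdzanie_sprzecznosci (table : List (List Int)) : Prop := [] ∉ table
instance (table : List (List Int)) : Decidable (Pre_sprzwdzanie_sprzecznosci table) := by unfold Pre_sprzwdzanie_sprzecznosci; infer_instance
def pvWitness_sprzwdzanie_sprzecznosci : List (List Int) := [[0, 1], [0, 2], [1, 2]]
def Spec_sprzwdzanie_sprzecznosci (table : List (List Int)) (out : List Int) : Prop := out = sprzwdzanie_sprzecznosci_alt table
instance (table : List (List Int)) (out : List Int) : Decidable (Spec_sprzwdzanie_sprzecznosci table out) := by unfold Spec_sprzwdzanie_sprzecznosci; infer_instance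

-- ===== CLAIM (what is proved, stated in full; the proofs are below) =====
def Claim_equal_sprzwdzanie_sprzecznosci : Prop := ∀ (table : List (List Int)), Dom_sprzwdzanie_sprzecznosci table → Pre_sprzwdzanie_sprzecznosci table → Spec_sprzwdzanie_sprzecznosci table (sprzwdzanie_sprzecznosci table)

-- ===== LEMMAS AND PROOFS =====

theorem pv_foldl_const {α β : Type} (l : List α) (init : β) :
    l.foldl (fun s _ => s) init = init := by
  induction l generalizing init with
  | nil => rfl
  | cons x xs ih => exact ih init

-- a 'setdefault(key(x), []).append(val(x))' loop, looked up afterwards, yields the filtered list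
theorem pv_foldl_modify_key {κ β γ : Type} [BEq κ] [LawfulBEq κ] (key : γ → κ) (val : γ → β)
    (l : List γ) (d : PySem.Dict κ (List β)) (c : κ) :
    (l.foldl (fun d x => d.modify (key x) [] (fun v => v ++ [val x])) d).getD c []
      = d.getD c [] ++ (l.filter (fun x => key x == c)).map val := by
  induction l generalizing d with
  | nil => simp
  | cons x xs ih =>
    rw [List.foldl_cons, ih, List.filter_cons]
    by_cases h : key x = c
    · subst h
      simp [PySem.Dict.getD_modify_self, List.append_assoc]
    · have hb : (key x == c) = false := beq_eq_false_iff_ne.mpr h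
      rw [hb]
      have hmod : (d.modify (key x) [] fun v => v ++ [val x]).getD c [] = d.getD c [] := by
        rw [PySem.Dict.getD_modify_of_ne]
        first
        | exact h
        | exact Ne.symm h
      simp [hmod]

-- a fold over range(0, n) whose body ignores all j ≤ i is a fold over range(i+1, n)
theorem pv_drop_prefix {β : Type} (f : β → Int → β) (acc : β) (i n : Int)
    (h0 : 0 ≤ i) (hn : i < n) (hskip : ∀ s j, 0 ≤ j → j ≤ i → f s j = s) :
    List.foldl f acc (PySem.List.pyRange 0 n) = List.foldl f acc (PySem.List.pyRange (i + 1) n) := by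
  rw [PySem.List.pyRange_one_append 0 (i + 1) n (by omega) (by omega), List.foldl_append]
  have hpre : List.foldl f acc (PySem.List.pyRange 0 (i + 1)) = acc := by
    have h := PySem.List.foldl_congr_mem (PySem.List.pyRange 0 (i + 1)) f (fun s _ => s) acc
      (by intro s j hj
          obtain ⟨h1, h2⟩ := PySem.List.mem_pyRange_one.mp hj
          exact hskip s j h1 (by omega))
    rw [h, pv_foldl_const]
  rw [hpre]

theorem pv_main (table : List (List Int)) :
    sprzwdzanie_sprzecznosci table = sprzwdzanie_sprzecznosci_alt table := by
  unfold sprzwdzanie_sprzecznosci sprzwdzanie_sprzecznosci_alt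
  simp only [pv_foldl_modify_key, PySem.Dict.getD_empty,
    PySem.List.enumerate_eq_map_pyRange table ([] : List Int), PySem.List.len_eq,
    List.foldl_map, List.foldl_filter, List.nil_append]
  apply PySem.List.foldl_congr_mem
  intro acc i hi
  obtain ⟨hi0, hin⟩ := PySem.List.mem_pyRange_one.mp hi
  refine Eq.trans ?_ (pv_drop_prefix _ acc i _ hi0 hin ?_).symm
  · apply PySem.List.foldl_congr_mem
    intro s j hj
    obtain ⟨hj1, hj2⟩ := PySem.List.mem_pyRange_one.mp hj
    have hij : i < j := by omega
    by_cases hk : PySem.List.slice (PySem.List.pyGetD table j []) none (some (-1))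
        = PySem.List.slice (PySem.List.pyGetD table i []) none (some (-1))
    · simp [hk, hij, ne_comm, eq_comm]
    · simp [hk, Ne.symm hk]
  · intro s j hj0 hji
    have hnot : ¬ (j > i) := by omega
    simp [hnot]

-- ===== VERDICT (by name: the statement is the Claim_ definition above) =====
theorem sprzwdzanie_sprzecznosci_spec : Claim_equal_sprzwdzanie_sprzecznosci := by
  intro table _ _
  unfold Spec_sprzwdzanie_sprzecznosci
  exact pv_main table
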